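-- pv_equiv track=rewrite | github.com/antoniomsantos99/Toybox | crudePhysics/crudePhysics.py | boxMaker
-- ===== SOURCE A (Python) =====
-- import math
--
-- def boxMaker(w,h):
--     l=[]
--     line=[]
--     box=[]
--
--     for i in range(h):
--       if i==0 or i == h-1:
--         l.append('#'*w)
--       else:
--         l.append('#'+' '*(w-2)+'#')
--
--     for i in l:
--       for x in i:
--         line.append((x))
--       box.append(line)
--       line=[]
--     box[math.ceil(h/2)][math.ceil(w/2)]='O'
--     return box
-- ===== SOURCE B (Python) =====
-- import math
--
-- def boxMaker(w, h):
--     # Paint approach: start from a blank w x h grid of spaces,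
--     # then stroke the top/bottom edges, then the left/right edges,
--     # and finally mark the center cell.
--     box = [[' '] * w for _ in range(h)]
--     for j in range(w):
--         box[0][j] = '#'
--         box[h - 1][j] = '#'
--     for i in range(h):
--         box[i][0] = '#'
--         box[i][w - 1] = '#'
--     box[math.ceil(h / 2)][math.ceil(w / 2)] = 'O'
--     return box
-- ===== Notes on version B (the rewrite author's own statement) =====
-- stated objective: alternative
-- what changed: B paints: it allocates an all-blank w x h grid and then strokes the horizontal edges (a column loop over the top and bottom rows) and the vertical edges (a row loop over the first and last columns), instead of A's row-by-row construction that builds each bordered row as a string and then explodes it into characters; Pre_ is restricted to w >= 2 and h >= 2 because for smaller w A's interior rows degenerate to a 2-char '##' artefact of its string arithmetic (B raises IndexError there), and for h <= 1 or w < -5 A itself raises IndexError on the center assignment.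
-- outside the precondition, e.g. on boxMaker(0, 4): A returns [[], ['#', '#'], ['O', '#'], []], B raises IndexError; on boxMaker(1, 4): A returns [['#'], ['#', '#'], ['#', 'O'], ['#']], B raises IndexError
import Mathlib
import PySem

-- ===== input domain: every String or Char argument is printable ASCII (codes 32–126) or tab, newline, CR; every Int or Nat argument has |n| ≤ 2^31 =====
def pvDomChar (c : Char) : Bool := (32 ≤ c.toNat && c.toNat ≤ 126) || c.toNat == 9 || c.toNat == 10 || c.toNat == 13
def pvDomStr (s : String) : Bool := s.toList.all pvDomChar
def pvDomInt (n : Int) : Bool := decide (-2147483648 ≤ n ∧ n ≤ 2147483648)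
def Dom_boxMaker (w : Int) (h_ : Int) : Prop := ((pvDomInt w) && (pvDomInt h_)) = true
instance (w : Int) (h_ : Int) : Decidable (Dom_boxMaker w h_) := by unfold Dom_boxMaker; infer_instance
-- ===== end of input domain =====

-- B paints instead of printing: it allocates an all-blank grid, strokes the horizontal edges with
-- a column loop and the vertical edges with a row loop, then marks the centre (objective:
-- alternative decomposition, same cost).

-- ===== PORT A =====
-- rows are kept as their character lists ('#'*w → pyRepeat ['#'] w), exact on every input
def boxMaker (w : Int) (h_ : Int) : List (List String) :=
  -- for i in range(h): l.append('#'*w)  /  l.append('#'+' '*(w-2)+'#')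
  let l : List (List Char) :=
    (PySem.List.pyRange 0 h_ 1).foldl (fun acc i =>
      if i = 0 ∨ i = h_ - 1 then acc ++ [PySem.List.pyRepeat ['#'] w]
      else acc ++ [['#'] ++ PySem.List.pyRepeat [' '] (w - 2) ++ ['#']]) []
  -- for i in l: for x in i: line.append(x); box.append(line); line=[]
  let box : List (List String) :=
    l.foldl (fun box i => box ++ [i.foldl (fun line x => line ++ [String.ofList [x]]) []]) []
  -- box[math.ceil(h/2)][math.ceil(w/2)] = 'O' ; math.ceil(n/2) = -((-n)//2), exact for |n| ≤ 2^31
  let r : Int := -(PySem.Int.floordiv (-h_) 2)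
  let c : Int := -(PySem.Int.floordiv (-w) 2)
  match PySem.List.pyGet? box r with
  | none => []          -- IndexError (excluded by Pre_)
  | some row =>
    match PySem.List.pySet? row c "O" with
    | none => []        -- IndexError (excluded by Pre_)
    | some row' => PySem.List.pySetD box r row'

-- ===== PORT B =====
-- box[i][j] = v  (none = IndexError, which Pre_ rules out; [] stands for the raised exception)
def pvPut (b : List (List String)) (i j : Int) (v : String) : List (List String) :=
  match PySem.List.pyGet? b i with
  | none => []
  | some row =>
    match PySem.List.pySet? row j v with
    | none => []
    | some row' => PySem.List.pySetD b i row'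

def boxMaker_alt (w : Int) (h_ : Int) : List (List String) :=
  -- box = [[' '] * w for _ in range(h)]
  let box : List (List String) :=
    (PySem.List.pyRange 0 h_ 1).map (fun _ => PySem.List.pyRepeat [" "] w)
  -- for j in range(w): box[0][j] = '#'; box[h-1][j] = '#'
  let box := (PySem.List.pyRange 0 w 1).foldl (fun b j => pvPut (pvPut b 0 j "#") (h_ - 1) j "#") box
  -- for i in range(h): box[i][0] = '#'; box[i][w-1] = '#'
  let box := (PySem.List.pyRange 0 h_ 1).foldl (fun b i => pvPut (pvPut b i 0 "#") i (w - 1) "#") box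
  -- box[math.ceil(h/2)][math.ceil(w/2)] = 'O'
  pvPut box (-(PySem.Int.floordiv (-h_) 2)) (-(PySem.Int.floordiv (-w) 2)) "O"

-- ===== PRECONDITION & SPEC =====
-- Pre_ excludes h ≤ 1 and w < -5, where A itself raises IndexError on the centre assignment, and
-- the degenerate widths w ≤ 1 (with h ≥ 4), where A still returns but its interior rows collapse
-- to the 2-char '##' artefact of its string arithmetic '#'+' '*(w-2)+'#' — B's paint loops raise
-- IndexError on such rows (and for h ∈ {2,3} with w < 2 A itself raises as well).
def Pre_boxMaker (w : Int) (h_ : Int) : Prop := 2 ≤ w ∧ 2 ≤ h_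
instance (w : Int) (h_ : Int) : Decidable (Pre_boxMaker w h_) := by unfold Pre_boxMaker; infer_instance
def pvWitness_boxMaker : Int × Int := (3, 4)
def Spec_boxMaker (w : Int) (h_ : Int) (out : List (List String)) : Prop := out = boxMaker_alt w h_
instance (w : Int) (h_ : Int) (out : List (List String)) : Decidable (Spec_boxMaker w h_ out) := by unfold Spec_boxMaker; infer_instance

-- ===== CLAIM (what is proved, stated in full; the proofs are below) =====
def Claim_equal_boxMaker : Prop := ∀ (w : Int) (h_ : Int), Dom_boxMaker w h_ → Pre_boxMaker w h_ → Spec_boxMaker w h_ (boxMaker w h_)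

-- ===== LEMMAS AND PROOFS =====

def pvGrid (wN hN : Nat) : List (List String) :=
  (List.range hN).map (fun i =>
    if i = 0 ∨ i = hN - 1 then List.replicate wN "#"
    else "#" :: (List.replicate (wN - 2) " " ++ ["#"]))

lemma pv_put_nat (b : List (List String)) (i j : Nat) (v : String)
    (hi : i < b.length) (hj : j < (b[i]'hi).length) :
    pvPut b (i : Int) (j : Int) v = b.set i ((b[i]'hi).set j v) := by
  unfold pvPut
  rw [PySem.List.pyGet?_natCast, List.getElem?_eq_getElem hi]
  simp only [PySem.List.pySet?_natCast _ _ _ hj, PySem.List.pySetD_natCast]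

lemma pv_set_map_range {α : Type} (f : Nat → α) (n i : Nat) (v : α) :
    ((List.range n).map f).set i v
      = (List.range n).map (fun j => if j = i then v else f j) := by
  apply List.ext_getElem
  · simp
  · intro k h1 h2
    simp only [List.getElem_set, List.getElem_map, List.getElem_range]
    simp only [List.length_set, List.length_map, List.length_range] at h1
    by_cases hk : i = k
    · simp [hk]
    · rw [if_neg hk, if_neg (by omega)]

lemma pv_paint_step (m k : Nat) (hk : k < m) :
    (List.replicate k "#" ++ List.replicate (m - k) " ").set k "#"
      = List.replicate (k + 1) "#" ++ List.replicate (m - (k + 1)) " " := by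
  rw [List.set_append_right _ _ (by simp)]
  simp only [List.length_replicate, Nat.sub_self]
  obtain ⟨t, ht⟩ : ∃ t, m - k = t + 1 := ⟨m - k - 1, by omega⟩
  rw [ht, List.replicate_succ, List.set_cons_zero, List.replicate_succ']
  simp [show m - (k + 1) = t by omega]

lemma pv_side_row (wN : Nat) (hw2 : 2 ≤ wN) :
    ((List.replicate wN " ").set 0 "#").set (wN - 1) "#"
      = "#" :: (List.replicate (wN - 2) " " ++ ["#"]) := by
  obtain ⟨m, rfl⟩ : ∃ m, wN = m + 2 := ⟨wN - 2, by omega⟩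
  rw [List.replicate_succ, List.set_cons_zero,
    show m + 2 - 1 = m + 1 from rfl, List.set_cons_succ, List.replicate_succ']
  rw [List.set_append_right _ _ (by simp)]
  simp

lemma pv_hstroke (wN hN : Nat) (hw2 : 2 ≤ wN) (hh2 : 2 ≤ hN) :
    (PySem.List.pyRange 0 (wN : Int) 1).foldl
        (fun b j => pvPut (pvPut b 0 j "#") ((hN : Int) - 1) j "#")
        ((PySem.List.pyRange 0 (hN : Int) 1).map (fun _ => PySem.List.pyRepeat [" "] (wN : Int)))
      = (List.range hN).map (fun i => if i = 0 ∨ i = hN - 1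
          then List.replicate wN "#" else List.replicate wN " ") := by
  rw [PySem.List.pyRange_one (0 : Int) (hN : Int), List.map_map]
  have hinit : ((fun (_ : Int) => PySem.List.pyRepeat [" "] (wN : Int)) ∘ fun (k : Nat) => (0 : Int) + (k : Int))
      = fun (_ : Nat) => List.replicate wN " " := by
    funext x
    simp [Function.comp, PySem.List.pyRepeat_singleton]
  rw [hinit, PySem.List.pyRange_one (0 : Int) (wN : Int), List.foldl_map, sub_zero, sub_zero,
    Int.toNat_natCast, Int.toNat_natCast]
  suffices H : ∀ k, k ≤ wN →
      (List.range k).foldl (fun b (j : Nat) => pvPut (pvPut b 0 ((0 : Int) + (j : Int)) "#") ((hN : Int) - 1) ((0 : Int) + (j : Int)) "#")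
          ((List.range hN).map (fun _ => List.replicate wN " "))
        = (List.range hN).map (fun i => if i = 0 ∨ i = hN - 1
            then (List.replicate k "#" ++ List.replicate (wN - k) " ") else List.replicate wN " ") by
    rw [H wN le_rfl]
    apply List.map_congr_left
    intro i _
    simp
  intro k hk
  induction k with
  | zero =>
    simp only [List.range_zero, List.foldl_nil]
    apply List.map_congr_left
    intro i _
    simp
  | succ k ih =>
    rw [List.range_succ, List.foldl_append, ih (by omega), List.foldl_cons, List.foldl_nil]
    have h0 : ((0 : Int) + ((k : Nat) : Int)) = ((k : Nat) : Int) := by ring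
    have hh1 : ((hN : Int) - 1) = (((hN - 1 : Nat)) : Int) := by omega
    have h00 : (0 : Int) = ((0 : Nat) : Int) := by simp
    rw [h0, hh1, h00]
    rw [pv_put_nat _ 0 k "#" (by simp; omega) (by simp; omega)]
    simp only [List.getElem_map, List.getElem_range, eq_self_iff_true, true_or, if_true]
    rw [pv_paint_step wN k (by omega), pv_set_map_range]
    rw [pv_put_nat _ (hN - 1) k "#" (by simp; omega)
      (by simp only [List.getElem_map, List.getElem_range]
          rw [if_neg (show ¬ (hN - 1 = 0) by omega)]
          simp; omega)]
    simp only [List.getElem_map, List.getElem_range]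
    rw [if_neg (show ¬ (hN - 1 = 0) by omega)]
    simp only [eq_self_iff_true, or_true, if_true]
    rw [pv_paint_step wN k (by omega), pv_set_map_range]
    apply List.map_congr_left
    intro i hi
    rw [List.mem_range] at hi
    by_cases h1 : i = hN - 1
    · simp [h1]
    · by_cases hz : i = 0
      · simp [hz, h1, show ¬ (0 = hN - 1) by omega]
      · simp [hz, h1]

lemma pv_vstroke (wN hN : Nat) (hw2 : 2 ≤ wN) (hh2 : 2 ≤ hN) :
    (PySem.List.pyRange 0 (hN : Int) 1).foldl
        (fun b i => pvPut (pvPut b i 0 "#") i ((wN : Int) - 1) "#")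
        ((List.range hN).map (fun i => if i = 0 ∨ i = hN - 1
          then List.replicate wN "#" else List.replicate wN " "))
      = pvGrid wN hN := by
  rw [PySem.List.pyRange_one (0 : Int) (hN : Int), List.foldl_map, sub_zero, Int.toNat_natCast]
  suffices H : ∀ k, k ≤ hN →
      (List.range k).foldl (fun b (i : Nat) => pvPut (pvPut b ((0 : Int) + (i : Int)) 0 "#") ((0 : Int) + (i : Int)) ((wN : Int) - 1) "#")
          ((List.range hN).map (fun i => if i = 0 ∨ i = hN - 1
            then List.replicate wN "#" else List.replicate wN " "))
        = (List.range hN).map (fun i =>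
            if i < k then (if i = 0 ∨ i = hN - 1 then List.replicate wN "#"
              else "#" :: (List.replicate (wN - 2) " " ++ ["#"]))
            else (if i = 0 ∨ i = hN - 1 then List.replicate wN "#" else List.replicate wN " ")) by
    rw [H hN le_rfl]
    unfold pvGrid
    apply List.map_congr_left
    intro i hi
    rw [List.mem_range] at hi
    rw [if_pos hi]
  intro k hk
  induction k with
  | zero =>
    simp only [List.range_zero, List.foldl_nil]
    apply List.map_congr_left
    intro i _
    simp
  | succ k ih =>
    rw [List.range_succ, List.foldl_append, ih (by omega), List.foldl_cons, List.foldl_nil]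
    have hklt : k < hN := by omega
    have hstartlen : ∀ c : Prop, ∀ [Decidable c],
        (if c then List.replicate wN "#" else List.replicate wN " ").length = wN := by
      intro c _
      split <;> simp
    have h0 : ((0 : Int) + ((k : Nat) : Int)) = ((k : Nat) : Int) := by ring
    have hw1 : ((wN : Int) - 1) = (((wN - 1 : Nat)) : Int) := by omega
    have h00 : (0 : Int) = ((0 : Nat) : Int) := by simp
    rw [h0, hw1, h00]
    rw [pv_put_nat _ k 0 "#" (by simp; omega)
      (by simp only [List.getElem_map, List.getElem_range, lt_self_iff_false, if_false]
          rw [hstartlen]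
          omega)]
    simp only [List.getElem_map, List.getElem_range, lt_self_iff_false, if_false]
    rw [pv_set_map_range]
    rw [pv_put_nat _ k (wN - 1) "#" (by simp; omega)
      (by simp only [List.getElem_map, List.getElem_range, eq_self_iff_true, if_true,
            List.length_set]
          rw [hstartlen]
          omega)]
    simp only [List.getElem_map, List.getElem_range, eq_self_iff_true, if_true]
    rw [pv_set_map_range]
    apply List.map_congr_left
    intro i hi
    rw [List.mem_range] at hi
    by_cases hik : i = k
    · subst hik
      simp only [eq_self_iff_true, if_true]
      rw [if_pos (show i < i + 1 by omega)]
      by_cases hb : i = 0 ∨ i = hN - 1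
      · rw [if_pos hb, if_pos hb, List.set_replicate_self, List.set_replicate_self]
      · rw [if_neg hb, if_neg hb, pv_side_row wN hw2]
    · rw [if_neg hik, if_neg hik]
      by_cases hlt : i < k
      · rw [if_pos hlt, if_pos (show i < k + 1 by omega)]
      · rw [if_neg hlt, if_neg (show ¬ i < k + 1 by omega)]

lemma pv_a_grid (wN hN : Nat) (hw2 : 2 ≤ wN) (hh2 : 2 ≤ hN) :
    ((PySem.List.pyRange 0 (hN : Int) 1).foldl (fun acc i =>
        if i = 0 ∨ i = (hN : Int) - 1 then acc ++ [PySem.List.pyRepeat ['#'] (wN : Int)]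
        else acc ++ [['#'] ++ PySem.List.pyRepeat [' '] ((wN : Int) - 2) ++ ['#']]) []).foldl
      (fun box i => box ++ [i.foldl (fun line x => line ++ [String.ofList [x]]) []]) []
      = pvGrid wN hN := by
  rw [PySem.List.foldl_congr_mem (PySem.List.pyRange 0 (hN : Int) 1)
      (fun acc i => if i = 0 ∨ i = (hN : Int) - 1 then acc ++ [PySem.List.pyRepeat ['#'] (wN : Int)]
        else acc ++ [['#'] ++ PySem.List.pyRepeat [' '] ((wN : Int) - 2) ++ ['#']])
      (fun acc i => acc ++ [if i = 0 ∨ i = (hN : Int) - 1 then PySem.List.pyRepeat ['#'] (wN : Int)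
        else ['#'] ++ PySem.List.pyRepeat [' '] ((wN : Int) - 2) ++ ['#']])
      [] (by intro acc i _; dsimp only; split <;> rfl)]
  rw [PySem.List.foldl_append_singleton_eq_map]
  rw [PySem.List.foldl_append_singleton_eq_map
      (fun i => if i = 0 ∨ i = (hN : Int) - 1 then PySem.List.pyRepeat ['#'] (wN : Int)
        else ['#'] ++ PySem.List.pyRepeat [' '] ((wN : Int) - 2) ++ ['#'])]
  simp only [List.nil_append, List.map_map]
  rw [PySem.List.pyRange_one (0 : Int) (hN : Int), List.map_map]
  unfold pvGrid
  apply List.map_congr_left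
  intro i hi
  rw [List.mem_range] at hi
  simp only [Function.comp, zero_add]
  have hcond : ((i : Int) = 0 ∨ (i : Int) = (hN : Int) - 1) ↔ (i = 0 ∨ i = hN - 1) := by omega
  by_cases hb : i = 0 ∨ i = hN - 1
  · rw [if_pos (hcond.mpr hb), if_pos hb, PySem.List.pyRepeat_singleton,
      PySem.List.foldl_append_singleton_eq_map, Int.toNat_natCast, List.nil_append,
      List.map_replicate, show String.ofList ['#'] = "#" from by decide]
  · rw [if_neg (fun h => hb (hcond.mp h)), if_neg hb, PySem.List.pyRepeat_singleton,
      PySem.List.foldl_append_singleton_eq_map, List.nil_append]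
    have h2 : ((wN : Int) - 2).toNat = wN - 2 := by omega
    simp [h2, show String.ofList ['#'] = "#" from by decide,
      show String.ofList [' '] = " " from by decide]

-- ===== VERDICT (by name: the statement is the Claim_ definition above) =====
theorem boxMaker_spec : Claim_equal_boxMaker := by
  intro w h_ _ hpre
  obtain ⟨hw, hh⟩ := hpre
  obtain ⟨wN, rfl⟩ : ∃ n : Nat, w = (n : Int) := ⟨w.toNat, by omega⟩
  obtain ⟨hN, rfl⟩ : ∃ n : Nat, h_ = (n : Int) := ⟨h_.toNat, by omega⟩
  have hw2 : 2 ≤ wN := by exact_mod_cast hw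
  have hh2 : 2 ≤ hN := by exact_mod_cast hh
  unfold Spec_boxMaker boxMaker boxMaker_alt
  simp only [pv_a_grid wN hN hw2 hh2, pv_hstroke wN hN hw2 hh2, pv_vstroke wN hN hw2 hh2]
  rfl
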